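-- pv_equiv track=rewrite | github.com/kh277/BOJ | 백준/Gold/14464. 소가 길을 건너간 이유 4/소가 길을 건너간 이유 4.py | solve
-- ===== SOURCE A (Python) =====
-- import heapq
--
-- def solve(T, task):
--     result = 0
--     T.sort()
--     task.sort(key= lambda x: (x[0], x[1]))
--     pq = []
--
--     taskIndex = 0
--     for i in range(len(T)):
--         curHelp = T[i]
--
--         # 시작할 수 있는 작업 우선순위 큐에 삽입
--         while taskIndex < len(task):
--             if task[taskIndex][0] <= curHelp:
--                 heapq.heappush(pq, [task[taskIndex][1], task[taskIndex][0]])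
--                 taskIndex += 1
--             else:
--                 break
--
--         # 작업 할당
--         while pq:
--             curD, curR = heapq.heappop(pq)
--
--             # 이미 taskIndex 작업이 끝나버린 경우
--             if curD < curHelp:
--                 continue
--             # 닭이 taskIndex 작업을 도와줄 수 있는 경우
--             elif curR <= curHelp <= curD:
--                 result += 1
--                 break
--             # taskIndex 작업이 아직 시작하지 않은 경우
--             else:
--                 break
--
--     return result
-- ===== SOURCE B (Python) =====
-- def solve(T, task):
--     # Same in-place sorts as the original (observable mutation of the arguments).
--     T.sort()
--     task.sort(key=lambda x: (x[0], x[1]))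
--     result = 0
--     avail = []          # deadlines of already-startable tasks, kept in ascending order
--     rest = 0
--     for h in T:
--         while rest < len(task) and task[rest][0] <= h:
--             d = task[rest][1]
--             i = 0
--             while i < len(avail) and avail[i] <= d:
--                 i += 1
--             avail.insert(i, d)
--             rest += 1
--         avail = [d for d in avail if d >= h]   # drop every expired task at once
--         if avail:
--             del avail[0]                       # take the tightest deadline
--             result += 1
--     return result
-- ===== Notes on version B (the rewrite author's own statement) =====
-- stated objective: alternative
-- what changed: Replaces the heap of [deadline,start] pairs and its pop/skip/break inner loop by a plain ascending list of deadlines only: expired deadlines are dropped in one filter pass and the head (tightest deadline) is taken, instead of popping heap entries one by one with continue/break.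
import Mathlib
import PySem

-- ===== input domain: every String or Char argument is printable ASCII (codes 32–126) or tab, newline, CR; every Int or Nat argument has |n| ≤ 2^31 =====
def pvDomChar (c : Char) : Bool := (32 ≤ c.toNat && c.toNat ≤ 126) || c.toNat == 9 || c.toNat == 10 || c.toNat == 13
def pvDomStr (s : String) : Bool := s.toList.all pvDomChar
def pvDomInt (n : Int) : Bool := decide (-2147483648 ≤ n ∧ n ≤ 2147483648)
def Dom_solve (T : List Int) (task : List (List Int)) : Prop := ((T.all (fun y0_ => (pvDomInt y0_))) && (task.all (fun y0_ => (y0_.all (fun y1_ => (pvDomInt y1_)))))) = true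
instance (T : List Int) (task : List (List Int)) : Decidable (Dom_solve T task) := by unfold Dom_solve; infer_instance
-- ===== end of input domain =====

-- B replaces A's heap of [deadline,start] pairs (popped one by one with continue/break)
-- by an ascending list of deadlines only, pruned by one filter pass; return values equal.
-- Both A and B sort the arguments T and task in place (same observable mutation).

-- ===== PORT A =====
-- heapq model: pq is kept as a list sorted by Python's list comparison on [d, s]
-- (lexicographic); heappush = ordered insert, heappop = take the head.  Exact:
-- heapq.heappop returns the smallest element of the heap, and entries comparing
-- equal here are identical values, so the observed pop sequence is exactly heapq's.
def pyLexLe (a b : Int × Int) : Bool := decide (a.1 < b.1 ∨ (a.1 = b.1 ∧ a.2 ≤ b.2))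

def heappush : List (Int × Int) → Int × Int → List (Int × Int)
  | [], x => [x]
  | y :: ys, x => if pyLexLe x y then x :: y :: ys else y :: heappush ys x

-- `while taskIndex < len(task)` loop; the cursor taskIndex is the remaining suffix.
-- x[0]/x[1] are List.getD 0 0 / getD 1 0: exact on Pre_solve (inner lists have ≥ 2 elements).
def pushLoopA : List (List Int) → Int → List (Int × Int) → List (Int × Int) × List (List Int)
  | [], _, pq => (pq, [])
  | t :: ts, curHelp, pq =>
    if t.getD 0 0 ≤ curHelp then pushLoopA ts curHelp (heappush pq (t.getD 1 0, t.getD 0 0))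
    else (pq, t :: ts)

-- `while pq` loop with continue/break: returns (result increment, remaining pq)
def popLoopA : List (Int × Int) → Int → Int × List (Int × Int)
  | [], _ => (0, [])
  | (curD, curR) :: rest, curHelp =>
    if curD < curHelp then popLoopA rest curHelp
    else if curR ≤ curHelp ∧ curHelp ≤ curD then (1, rest)
    else (0, rest)

-- body of `for i in range(len(T))`, state = (result, pq, remaining tasks)
def stepA (st : Int × List (Int × Int) × List (List Int)) (curHelp : Int) :
    Int × List (Int × Int) × List (List Int) :=
  let pr := pushLoopA st.2.2 curHelp st.2.1
  let ip := popLoopA pr.1 curHelp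
  (st.1 + ip.1, ip.2, pr.2)

def solve (T : List Int) (task : List (List Int)) : Int :=
  ((PySem.List.sorted T (fun x => x) false).foldl stepA
      (0, [], PySem.List.sorted2 task (fun t => t.getD 0 0) (fun t => t.getD 1 0) false)).1

-- ===== PORT B =====
-- Source B's inner `while i < len(avail) and avail[i] <= d` + insert: ordered insert after equals
def insortInt : List Int → Int → List Int
  | [], d => [d]
  | y :: ys, d => if y ≤ d then y :: insortInt ys d else d :: y :: ys

def pushLoopB : List (List Int) → Int → List Int → List Int × List (List Int)
  | [], _, avail => (avail, [])
  | t :: ts, h, avail =>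
    if t.getD 0 0 ≤ h then pushLoopB ts h (insortInt avail (t.getD 1 0))
    else (avail, t :: ts)

-- body of `for h in T:`, state = (result, avail, remaining tasks)
def stepB (st : Int × List Int × List (List Int)) (h : Int) :
    Int × List Int × List (List Int) :=
  let ar := pushLoopB st.2.2 h st.2.1
  match ar.1.filter (fun d => decide (h ≤ d)) with   -- avail = [d for d in avail if d >= h]
  | [] => (st.1, [], ar.2)
  | _ :: tl => (st.1 + 1, tl, ar.2)                  -- del avail[0]; result += 1

def solve_alt (T : List Int) (task : List (List Int)) : Int :=
  ((PySem.List.sorted T (fun x => x) false).foldl stepB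
      (0, [], PySem.List.sorted2 task (fun t => t.getD 0 0) (fun t => t.getD 1 0) false)).1

-- ===== PRECONDITION & SPEC =====
-- Pre_solve excludes exactly the inputs with an inner task list of fewer than 2 elements:
-- there Python A's sort key x[0]/x[1] raises IndexError (B raises there too).
def Pre_solve (T : List Int) (task : List (List Int)) : Prop := ∀ t ∈ task, 2 ≤ t.length
instance (T : List Int) (task : List (List Int)) : Decidable (Pre_solve T task) := by unfold Pre_solve; infer_instance
def pvWitness_solve : List Int × List (List Int) := ([2, 1, 4], [[1, 2], [2, 5], [0, 1]])

def Spec_solve (T : List Int) (task : List (List Int)) (out : Int) : Prop := out = solve_alt T task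
instance (T : List Int) (task : List (List Int)) (out : Int) : Decidable (Spec_solve T task out) := by unfold Spec_solve; infer_instance

-- ===== CLAIM (what is proved, stated in full; the proofs are below) =====
def Claim_equal_solve : Prop := ∀ (T : List Int) (task : List (List Int)), Dom_solve T task → Pre_solve T task → Spec_solve T task (solve T task)

-- ===== LEMMAS AND PROOFS =====
def LexR (a b : Int × Int) : Prop := pyLexLe a b = true

theorem lexR_total (a b : Int × Int) : LexR a b ∨ LexR b a := by
  simp [LexR, pyLexLe]; omega

theorem lexR_trans {a b c : Int × Int} (h1 : LexR a b) (h2 : LexR b c) : LexR a c := by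
  simp [LexR, pyLexLe] at *; omega

theorem heappush_perm (pq : List (Int × Int)) (x : Int × Int) :
    (heappush pq x).Perm (x :: pq) := by
  induction pq with
  | nil => simp [heappush]
  | cons y ys ih =>
    simp only [heappush]
    split
    · exact List.Perm.refl _
    · exact (ih.cons y).trans (List.Perm.swap x y ys)

theorem heappush_pairwise {pq : List (Int × Int)} (x : Int × Int)
    (h : pq.Pairwise LexR) : (heappush pq x).Pairwise LexR := by
  induction pq with
  | nil => simp [heappush]
  | cons y ys ih =>
    rcases List.pairwise_cons.mp h with ⟨hy, hys⟩
    simp only [heappush]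
    split
    · rename_i hxy
      refine List.pairwise_cons.mpr ⟨?_, h⟩
      intro z hz
      rcases List.mem_cons.mp hz with rfl | hz
      · exact hxy
      · exact lexR_trans hxy (hy z hz)
    · rename_i hxy
      have hyx : LexR y x := (lexR_total x y).resolve_left hxy
      refine List.pairwise_cons.mpr ⟨?_, ih hys⟩
      intro z hz
      rcases List.mem_cons.mp ((heappush_perm ys x).mem_iff.mp hz) with rfl | hz
      · exact hyx
      · exact hy z hz

theorem insortInt_perm (av : List Int) (d : Int) : (insortInt av d).Perm (d :: av) := by
  induction av with
  | nil => simp [insortInt]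
  | cons y ys ih =>
    simp only [insortInt]
    split
    · exact (ih.cons y).trans (List.Perm.swap d y ys)
    · exact List.Perm.refl _

theorem insortInt_pairwise {av : List Int} (d : Int)
    (h : av.Pairwise (· ≤ ·)) : (insortInt av d).Pairwise (· ≤ ·) := by
  induction av with
  | nil => simp [insortInt]
  | cons y ys ih =>
    rcases List.pairwise_cons.mp h with ⟨hy, hys⟩
    simp only [insortInt]
    split
    · rename_i hyd
      refine List.pairwise_cons.mpr ⟨?_, ih hys⟩
      intro z hz
      rcases List.mem_cons.mp ((insortInt_perm ys d).mem_iff.mp hz) with rfl | hz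
      · exact hyd
      · exact hy z hz
    · rename_i hyd
      refine List.pairwise_cons.mpr ⟨?_, h⟩
      intro z hz
      rcases List.mem_cons.mp hz with rfl | hz
      · omega
      · exact le_trans (by omega) (hy z hz)

theorem map_fst_pairwise {pq : List (Int × Int)} (h : pq.Pairwise LexR) :
    (pq.map Prod.fst).Pairwise (· ≤ · : Int → Int → Prop) := by
  refine List.Pairwise.map _ ?_ h
  intro a b hab
  simp [LexR, pyLexLe] at hab; omega

theorem heappush_map_fst {pq : List (Int × Int)} (x : Int × Int)
    (h : pq.Pairwise LexR) :
    (heappush pq x).map Prod.fst = insortInt (pq.map Prod.fst) x.1 := by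
  refine List.Perm.eq_of_pairwise (fun a b _ _ h1 h2 => le_antisymm h1 h2)
    (map_fst_pairwise (heappush_pairwise x h)) (insortInt_pairwise _ (map_fst_pairwise h))
    (((heappush_perm pq x).map Prod.fst).trans (insortInt_perm _ _).symm)

theorem pushLoop_corr (ts : List (List Int)) (h : Int) (pq : List (Int × Int))
    (hpw : pq.Pairwise LexR) (hs : ∀ p ∈ pq, p.2 ≤ h) :
    pushLoopB ts h (pq.map Prod.fst) = ((pushLoopA ts h pq).1.map Prod.fst, (pushLoopA ts h pq).2)
    ∧ (pushLoopA ts h pq).1.Pairwise LexR ∧ ∀ p ∈ (pushLoopA ts h pq).1, p.2 ≤ h := by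
  induction ts generalizing pq with
  | nil => exact ⟨rfl, hpw, hs⟩
  | cons t ts ih =>
    by_cases hc : t.getD 0 0 ≤ h
    · have hx : ∀ p ∈ heappush pq (t.getD 1 0, t.getD 0 0), p.2 ≤ h := by
        intro p hp
        rcases List.mem_cons.mp ((heappush_perm _ _).mem_iff.mp hp) with rfl | hp
        · simpa using hc
        · exact hs p hp
      have hind := ih (heappush pq (t.getD 1 0, t.getD 0 0)) (heappush_pairwise _ hpw) hx
      simp only [pushLoopA, pushLoopB, if_pos hc]
      rw [heappush_map_fst (t.getD 1 0, t.getD 0 0) hpw] at hind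
      exact hind
    · simp only [pushLoopA, pushLoopB, if_neg hc]
      exact ⟨by trivial, hpw, hs⟩

theorem popLoop_corr (pq : List (Int × Int)) (h : Int)
    (hpw : pq.Pairwise LexR) (hs : ∀ p ∈ pq, p.2 ≤ h) :
    (popLoopA pq h).1 = (if ((pq.map Prod.fst).filter (fun d => decide (h ≤ d))) = [] then 0 else 1)
    ∧ (popLoopA pq h).2.map Prod.fst = ((pq.map Prod.fst).filter (fun d => decide (h ≤ d))).tail
    ∧ (popLoopA pq h).2.Pairwise LexR ∧ ∀ p ∈ (popLoopA pq h).2, p.2 ≤ h := by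
  induction pq with
  | nil => simp [popLoopA]
  | cons p rest ih =>
    obtain ⟨d, s⟩ := p
    rcases List.pairwise_cons.mp hpw with ⟨hd, hrest⟩
    have hsd : s ≤ h := hs (d, s) (by simp)
    by_cases hdh : d < h
    · have : ¬ (h ≤ d) := by omega
      simp only [popLoopA, if_pos hdh, List.map_cons, List.filter_cons, this, decide_false]
      exact ih hrest (fun p hp => hs p (List.mem_cons_of_mem _ hp))
    · have hhd : h ≤ d := by omega
      have hfil : (rest.map Prod.fst).filter (fun d => decide (h ≤ d)) = rest.map Prod.fst := by
        refine List.filter_eq_self.mpr ?_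
        intro y hy
        rcases List.mem_map.mp hy with ⟨q, hq, rfl⟩
        have : pyLexLe (d, s) q = true := hd q hq
        simp only [pyLexLe, decide_eq_true_eq] at this
        simp only [decide_eq_true_eq]
        omega
      have hpop : popLoopA ((d, s) :: rest) h = (1, rest) := by
        simp only [popLoopA, if_neg hdh, if_pos (show s ≤ h ∧ h ≤ d from ⟨hsd, hhd⟩)]
      have hfil2 : ((d :: rest.map Prod.fst).filter (fun d => decide (h ≤ d)))
          = d :: rest.map Prod.fst := by
        simp [hhd, hfil]
      rw [hpop, List.map_cons, hfil2]
      exact ⟨by simp, by simp, hrest, fun p hp => hs p (List.mem_cons_of_mem _ hp)⟩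

theorem fold_corr (Ts : List Int) : Ts.Pairwise (· ≤ ·) →
    ∀ (res : Int) (pq : List (Int × Int)) (rest : List (List Int)),
      pq.Pairwise LexR → (∀ p ∈ pq, ∀ h ∈ Ts, p.2 ≤ h) →
      (Ts.foldl stepB (res, pq.map Prod.fst, rest)).1 = (Ts.foldl stepA (res, pq, rest)).1 := by
  induction Ts with
  | nil => intro _ res pq rest _ _; rfl
  | cons h hs ih =>
    intro hT res pq rest hpw hsall
    rcases List.pairwise_cons.mp hT with ⟨hh, hTs⟩
    obtain ⟨hBeq, hpw1, hs1⟩ := pushLoop_corr rest h pq hpw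
      (fun p hp => hsall p hp h (by simp))
    obtain ⟨h1, h2, h3, h4⟩ := popLoop_corr (pushLoopA rest h pq).1 h hpw1 hs1
    have hnext : ∀ p ∈ (popLoopA (pushLoopA rest h pq).1 h).2, ∀ h' ∈ hs, p.2 ≤ h' :=
      fun p hp h' hh' => le_trans (h4 p hp) (hh h' hh')
    simp only [List.foldl_cons]
    have hstepB : stepB (res, pq.map Prod.fst, rest) h =
        (res + (popLoopA (pushLoopA rest h pq).1 h).1,
         (popLoopA (pushLoopA rest h pq).1 h).2.map Prod.fst,
         (pushLoopA rest h pq).2) := by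
      simp only [stepB, hBeq]
      cases hfil : ((pushLoopA rest h pq).1.map Prod.fst).filter (fun d => decide (h ≤ d)) with
      | nil => simp [hfil] at h1 h2; simp [h1, h2]
      | cons d tl =>
        simp [hfil] at h1 h2
        simp [h1, h2]
    rw [hstepB]
    have hstepA : stepA (res, pq, rest) h =
        (res + (popLoopA (pushLoopA rest h pq).1 h).1,
         (popLoopA (pushLoopA rest h pq).1 h).2,
         (pushLoopA rest h pq).2) := rfl
    rw [hstepA]
    exact ih hTs _ _ _ h3 hnext

-- ===== VERDICT (by name: the statement is the Claim_ definition above) =====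
theorem solve_spec : Claim_equal_solve := by
  intro T task _ _
  unfold Spec_solve solve solve_alt
  exact (fold_corr _ (by simpa using PySem.List.sorted_pairwise T (fun x => x)) 0 [] _
    (by simp) (by simp)).symm
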